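-- pv_equiv track=rewrite | github.com/KHAKhazeus/Scouter | scripts/train_ppo.py | _split_games
-- ===== SOURCE A (Python) =====
-- def _split_games(total_games: int, workers: int) -> list[tuple[int, int]]:
--     n = max(1, int(workers))
--     if total_games <= 0:
--         return []
--     n = min(n, total_games)
--     base = total_games // n
--     rem = total_games % n
--     out: list[tuple[int, int]] = []
--     start = 0
--     for i in range(n):
--         cnt = base + (1 if i < rem else 0)
--         out.append((start, cnt))
--         start += cnt
--     return out
-- ===== SOURCE B (Python) =====
-- def _split_games(total_games: int, workers: int) -> list[tuple[int, int]]: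
--     n = max(1, int(workers))
--     if total_games <= 0:
--         return []
--     n = min(n, total_games)
--     base, rem = divmod(total_games, n)
--
--     def bound(i: int) -> int:
--         return i * base + min(i, rem)
--
--     return [(bound(i), bound(i + 1) - bound(i)) for i in range(n)]
-- ===== Notes on version B (the rewrite author's own statement) =====
-- stated objective: simpler
-- what changed: Replaces the running start-accumulator loop with a closed-form per-index boundary formula bound(i) = i*base + min(i, rem) and a single comprehension.
import Mathlib
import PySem

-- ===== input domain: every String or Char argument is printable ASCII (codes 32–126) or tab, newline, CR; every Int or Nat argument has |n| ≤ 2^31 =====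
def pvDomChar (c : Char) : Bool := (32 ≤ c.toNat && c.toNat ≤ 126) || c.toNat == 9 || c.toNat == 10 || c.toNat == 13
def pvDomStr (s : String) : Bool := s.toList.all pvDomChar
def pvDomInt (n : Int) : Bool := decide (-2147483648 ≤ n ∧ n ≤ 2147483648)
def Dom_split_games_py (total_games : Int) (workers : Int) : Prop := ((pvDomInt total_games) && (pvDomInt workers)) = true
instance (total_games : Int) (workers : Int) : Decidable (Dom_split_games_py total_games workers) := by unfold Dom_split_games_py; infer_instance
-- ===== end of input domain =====

-- B replaces A's running start accumulator by the closed-form boundary i*base + min i rem (simpler decomposition, same cost).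

-- ===== PORT A =====
def split_games_py (total_games : Int) (workers : Int) : List (Int × Int) :=
  let n := max 1 workers
  if total_games ≤ 0 then []
  else
    let n := min n total_games
    let base := PySem.Int.floordiv total_games n
    let rem := PySem.Int.mod total_games n
    let p := (PySem.List.pyRange 0 n 1).foldl
      (fun (st : List (Int × Int) × Int) i =>
        let cnt := base + (if i < rem then 1 else 0)
        (st.1 ++ [(st.2, cnt)], st.2 + cnt)) ([], 0)
    p.1

-- ===== PORT B =====
def split_games_py_alt (total_games : Int) (workers : Int) : List (Int × Int) :=
  let n := max 1 workers
  if total_games ≤ 0 then []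
  else
    let n := min n total_games
    let base := PySem.Int.floordiv total_games n
    let rem := PySem.Int.mod total_games n
    let bound := fun (i : Int) => i * base + min i rem
    (PySem.List.pyRange 0 n 1).map (fun i => (bound i, bound (i + 1) - bound i))

-- ===== PRECONDITION & SPEC =====
def Spec_split_games_py (total_games : Int) (workers : Int) (out : List (Int × Int)) : Prop := out = split_games_py_alt total_games workers
instance (total_games : Int) (workers : Int) (out : List (Int × Int)) : Decidable (Spec_split_games_py total_games workers out) := by unfold Spec_split_games_py; infer_instance

-- ===== CLAIM (what is proved, stated in full; the proofs are below) =====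
def Claim_equal_split_games_py : Prop := ∀ (total_games : Int) (workers : Int), Dom_split_games_py total_games workers → Spec_split_games_py total_games workers (split_games_py total_games workers)

-- ===== LEMMAS AND PROOFS =====

-- Loop invariant: folding A's body over range a..b starting from start = bound a
-- appends exactly B's closed-form chunks and ends with start = bound b.
theorem split_loop_eq (base rem : Int) :
    ∀ (k : Nat) (a b : Int) (acc : List (Int × Int)), (b - a).toNat = k → a ≤ b →
      (PySem.List.pyRange a b 1).foldl
        (fun (st : List (Int × Int) × Int) i =>
          let cnt := base + (if i < rem then 1 else 0)
          (st.1 ++ [(st.2, cnt)], st.2 + cnt)) (acc, a * base + min a rem)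
      = (acc ++ (PySem.List.pyRange a b 1).map
          (fun i => (i * base + min i rem, (i + 1) * base + min (i + 1) rem - (i * base + min i rem))),
         b * base + min b rem) := by
  intro k
  induction k with
  | zero =>
      intro a b acc hk hab
      have hba : b = a := by omega
      simp [hba]
  | succ k ih =>
      intro a b acc hk hab
      have hlt : a < b := by omega
      rw [PySem.List.pyRange_one_cons hlt]
      simp only [List.foldl_cons, List.map_cons]
      have hstep : a * base + min a rem + (base + (if a < rem then 1 else 0))
          = (a + 1) * base + min (a + 1) rem := by
        by_cases h : a < rem
        · simp only [min_eq_left (by omega : a ≤ rem), min_eq_left (by omega : a + 1 ≤ rem),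
            if_pos h]; ring
        · simp only [min_eq_right (by omega : rem ≤ a), min_eq_right (by omega : rem ≤ a + 1),
            if_neg h]; ring
      rw [hstep, ih (a + 1) b (acc ++ [(a * base + min a rem, base + (if a < rem then 1 else 0))])
        (by omega) (by omega)]
      have hcnt : base + (if a < rem then 1 else 0)
          = (a + 1) * base + min (a + 1) rem - (a * base + min a rem) := by omega
      rw [hcnt]
      simp

theorem split_games_eq (total_games workers : Int) :
    split_games_py total_games workers = split_games_py_alt total_games workers := by
  unfold split_games_py split_games_py_alt
  by_cases h : total_games ≤ 0
  · simp [h]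
  · simp only [if_neg h]
    set n := min (max 1 workers) total_games with hn
    have hnpos : 0 < n := by
      have : (0:Int) < total_games := by omega
      simp only [hn]
      omega
    have hrem : 0 ≤ PySem.Int.mod total_games n := PySem.Int.mod_nonneg _ hnpos
    have := split_loop_eq (PySem.Int.floordiv total_games n) (PySem.Int.mod total_games n)
      (n - 0).toNat 0 n [] rfl (by omega)
    simp only [zero_mul, zero_add, min_eq_left hrem] at this
    rw [this]
    simp

-- ===== VERDICT (by name: the statement is the Claim_ definition above) =====
theorem split_games_py_spec : Claim_equal_split_games_py := by
  intro total_games workers _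
  exact split_games_eq total_games workers
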